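-- pv_equiv track=rewrite | github.com/Leapense/problems | 22871번: 징검다리 건너기 (large)/gen.py | arr_blocks
-- ===== SOURCE A (Python) =====
-- from typing import List, Tuple
--
-- def arr_blocks(n: int, vals: List[int], block_size: int) -> List[int]:
--     a = []
--     idx = 0
--     while len(a) < n:
--         v = vals[idx % len(vals)]
--         take = min(block_size, n - len(a))
--         a.extend([v]*take)
--         idx += 1
--     return a
-- ===== SOURCE B (Python) =====
-- from typing import List
--
-- def arr_blocks(n: int, vals: List[int], block_size: int) -> List[int]:
--     return [vals[(i // block_size) % len(vals)] for i in range(n)]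
-- ===== Notes on version B (the rewrite author's own statement) =====
-- stated objective: simpler
-- what changed: Replaces the while-loop that extends the list block by block with a block counter by a single comprehension that derives each element directly from its position via i // block_size mod len(vals).
import Mathlib
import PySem

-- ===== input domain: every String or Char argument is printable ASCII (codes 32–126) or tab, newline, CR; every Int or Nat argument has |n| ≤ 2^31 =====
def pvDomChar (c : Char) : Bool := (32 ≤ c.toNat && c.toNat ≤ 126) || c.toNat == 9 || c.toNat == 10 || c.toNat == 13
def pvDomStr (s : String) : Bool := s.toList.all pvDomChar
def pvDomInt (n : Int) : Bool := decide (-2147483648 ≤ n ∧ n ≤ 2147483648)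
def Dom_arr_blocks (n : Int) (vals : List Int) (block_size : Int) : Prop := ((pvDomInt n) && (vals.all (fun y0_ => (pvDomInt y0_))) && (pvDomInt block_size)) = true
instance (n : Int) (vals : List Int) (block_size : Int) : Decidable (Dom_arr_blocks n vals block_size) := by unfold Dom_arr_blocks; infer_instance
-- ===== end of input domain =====

-- B builds each element directly from its position (i // block_size) % len(vals) in one pass,
-- instead of A's while-loop extending block by block with a counter; objective: simpler.


-- ===== PORT A =====
-- the while loop; fuel n.toNat suffices: inside Pre_ every iteration appends at least one element
def arrBlocksLoop (n : Int) (vals : List Int) (block_size : Int) : Nat → List Int → Int → List Int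
  | 0, a, _ => a
  | fuel + 1, a, idx =>
    if (a.length : Int) < n then
      arrBlocksLoop n vals block_size fuel
        (a ++ List.replicate (min block_size (n - (a.length : Int))).toNat
          ((PySem.List.pyGet? vals (PySem.Int.mod idx (vals.length : Int))).getD 0)) (idx + 1)
    else a

def arr_blocks (n : Int) (vals : List Int) (block_size : Int) : List Int :=
  arrBlocksLoop n vals block_size n.toNat [] 0

-- ===== PORT B =====
def arr_blocks_alt (n : Int) (vals : List Int) (block_size : Int) : List Int :=
  (List.range n.toNat).map (fun (i : Nat) =>
    (PySem.List.pyGet? vals (PySem.Int.mod (PySem.Int.floordiv (i : Int) block_size) (vals.length : Int))).getD 0)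

-- ===== PRECONDITION & SPEC =====
-- Pre_ excludes inputs where A does not return normally: with n > 0, A raises
-- ZeroDivisionError if vals is empty, and loops forever if block_size <= 0.
def Pre_arr_blocks (n : Int) (vals : List Int) (block_size : Int) : Prop :=
  n ≤ 0 ∨ (vals ≠ [] ∧ 0 < block_size)
instance (n : Int) (vals : List Int) (block_size : Int) : Decidable (Pre_arr_blocks n vals block_size) := by unfold Pre_arr_blocks; infer_instance

def pvWitness_arr_blocks : Int × List Int × Int := (7, [1, 2, 3], 2)

def Spec_arr_blocks (n : Int) (vals : List Int) (block_size : Int) (out : List Int) : Prop := out = arr_blocks_alt n vals block_size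
instance (n : Int) (vals : List Int) (block_size : Int) (out : List Int) : Decidable (Spec_arr_blocks n vals block_size out) := by unfold Spec_arr_blocks; infer_instance

-- ===== CLAIM (what is proved, stated in full; the proofs are below) =====
def Claim_equal_arr_blocks : Prop := ∀ (n : Int) (vals : List Int) (block_size : Int), Dom_arr_blocks n vals block_size → Pre_arr_blocks n vals block_size → Spec_arr_blocks n vals block_size (arr_blocks n vals block_size)

-- ===== LEMMAS AND PROOFS =====

-- the position function of B, over Nat parameters
def pvG (vals : List Int) (B : Nat) (i : Nat) : Int :=
  (PySem.List.pyGet? vals (PySem.Int.mod (PySem.Int.floordiv (i : Int) (B : Int)) (vals.length : Int))).getD 0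

lemma pvG_block (vals : List Int) (B k j : Nat) (hB : 1 ≤ B) (hj : j < B) :
    pvG vals B (k * B + j) = (PySem.List.pyGet? vals (PySem.Int.mod (k : Int) (vals.length : Int))).getD 0 := by
  unfold pvG
  have h1 : PySem.Int.floordiv ((k * B + j : Nat) : Int) ((B : Nat) : Int) = (((k * B + j) / B : Nat) : Int) :=
    PySem.Int.floordiv_natCast _ _
  have h2 : (k * B + j) / B = k := by
    rw [Nat.add_comm, Nat.add_mul_div_right _ _ (by omega : 0 < B), Nat.div_eq_of_lt hj]
    omega
  rw [h1, h2]

lemma map_range_const {α : Type} (g : Nat → α) (v : α) (t : Nat) (h : ∀ j < t, g j = v) :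
    (List.range t).map g = List.replicate t v := by
  induction t with
  | zero => simp
  | succ t ih =>
    rw [List.range_succ, List.map_append, ih (fun j hj => h j (by omega))]
    simp [h t (by omega), List.replicate_succ']

lemma loop_inv (vals : List Int) (N B : Nat) (hB : 1 ≤ B) :
    ∀ (fuel k : Nat), N ≤ min (k * B) N + fuel * B →
      arrBlocksLoop (N : Int) vals (B : Int) fuel ((List.range (min (k * B) N)).map (pvG vals B)) (k : Int)
        = (List.range N).map (pvG vals B) := by
  intro fuel
  induction fuel with
  | zero =>
    intro k hk
    have : min (k * B) N = N := by omega
    rw [this]; rfl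
  | succ fuel ih =>
    intro k hk
    by_cases hm : k * B < N
    · have hmin : min (k * B) N = k * B := by omega
      rw [hmin] at hk ⊢
      have hlen : ((List.range (k * B)).map (pvG vals B)).length = k * B := by simp
      rw [arrBlocksLoop]
      rw [if_pos (by rw [hlen]; exact_mod_cast hm)]
      rw [hlen]
      set t : Nat := min B (N - k * B) with ht
      have htake : (min (B : Int) ((N : Int) - ((k * B : Nat) : Int))).toNat = t := by
        have h : (min (B : Int) ((N : Int) - ((k * B : Nat) : Int))) = (t : Int) := by
          rw [ht, Nat.cast_min, Int.natCast_sub hm.le]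
        rw [h]; exact Int.toNat_natCast t
      have ht1 : 1 ≤ t := by omega
      have hnew : (List.range (k * B)).map (pvG vals B) ++
          List.replicate t ((PySem.List.pyGet? vals (PySem.Int.mod ((k : Nat) : Int) (vals.length : Int))).getD 0)
          = (List.range (min ((k + 1) * B) N)).map (pvG vals B) := by
        have hsum : min ((k + 1) * B) N = k * B + t := by
          have : (k + 1) * B = k * B + B := by ring
          omega
        rw [hsum, List.range_add, List.map_append]
        congr 1
        rw [List.map_map]
        exact (map_range_const _ _ t (fun j hj => pvG_block vals B k j hB (by omega))).symm
      rw [htake, hnew]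
      have : ((k : Int) + 1) = ((k + 1 : Nat) : Int) := by push_cast; ring
      rw [this]
      apply ih
      have h1 : (k + 1) * B = k * B + B := by ring
      have h2 : (fuel + 1) * B = fuel * B + B := by ring
      omega
    · have hmin : min (k * B) N = N := by omega
      rw [hmin]
      rw [arrBlocksLoop]
      rw [if_neg (by simp)]

-- ===== VERDICT (by name: the statement is the Claim_ definition above) =====
theorem arr_blocks_spec : Claim_equal_arr_blocks := by
  intro n vals bs _ hpre
  unfold Spec_arr_blocks arr_blocks arr_blocks_alt
  by_cases hn : n ≤ 0
  · rw [show n.toNat = 0 from by omega]; rfl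
  · rcases hpre with h | ⟨hv, hbs⟩
    · omega
    · have hB : 1 ≤ bs.toNat := by omega
      have key := loop_inv vals n.toNat bs.toNat hB n.toNat 0 (by
        have := Nat.le_mul_of_pos_right n.toNat (show 0 < bs.toNat by omega)
        omega)
      have e1 : ((n.toNat : Nat) : Int) = n := Int.toNat_of_nonneg (by omega)
      have e2 : ((bs.toNat : Nat) : Int) = bs := Int.toNat_of_nonneg (by omega)
      simp only [Nat.zero_mul, Nat.zero_min, List.range_zero, List.map_nil,
        Nat.cast_zero, e1, e2] at key
      have hfun : (fun (i : Nat) => (PySem.List.pyGet? vals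
          (PySem.Int.mod (PySem.Int.floordiv (i : Int) bs) (vals.length : Int))).getD 0)
          = pvG vals bs.toNat := by
        funext i; simp only [pvG, e2]
      rw [hfun]; exact key
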